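-- pv_equiv track=rewrite | github.com/jlenchner/theorizer | consequence_generation.py | reorder_measured_vars_for_save
-- ===== SOURCE A (Python) =====
-- def reorder_measured_vars_for_save(sorted_vars):
--     """
--     Apply required ordering for measured variables before saving:
--       1) d1, d2 (if present)
--       2) theta (if present)
--       3) sinTheta, cosTheta, eTheta (if present, in that order)
--       4) remaining vars in the order they already appear (sorted by degree desc)
--     """
--     prefix = []
--     for v in ('d1', 'd2'):
--         if v in sorted_vars:
--             prefix.append(v)
--     if 'theta' in sorted_vars:
--         prefix.append('theta')
--     for v in ('sinTheta', 'cosTheta', 'eTheta'):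
--         if v in sorted_vars:
--             prefix.append(v)
--     rest = [v for v in sorted_vars if v not in set(prefix)]
--     return prefix + rest
-- ===== SOURCE B (Python) =====
-- _RANK = {'d1': 0, 'd2': 1, 'theta': 2, 'sinTheta': 3, 'cosTheta': 4, 'eTheta': 5}
--
-- def reorder_measured_vars_for_save(sorted_vars):
--     # Drop repeated occurrences of priority names, then let ONE stable sort by
--     # rank (priority names 0..5, everything else 6) produce the required order.
--     seen = set()
--     deduped = []
--     for v in sorted_vars:
--         if v in _RANK:
--             if v in seen:
--                 continue
--             seen.add(v)
--         deduped.append(v)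
--     return sorted(deduped, key=lambda v: _RANK.get(v, 6))
-- ===== Notes on version B (the rewrite author's own statement) =====
-- stated objective: alternative
-- what changed: B replaces A's fixed-prefix construction (six membership scans plus a set-filter for the rest) by one stable sort keyed on a rank dict (priority names 0..5, everything else 6), after dropping repeated occurrences of priority names; sort stability keeps the non-priority vars in their original order.
import Mathlib
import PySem

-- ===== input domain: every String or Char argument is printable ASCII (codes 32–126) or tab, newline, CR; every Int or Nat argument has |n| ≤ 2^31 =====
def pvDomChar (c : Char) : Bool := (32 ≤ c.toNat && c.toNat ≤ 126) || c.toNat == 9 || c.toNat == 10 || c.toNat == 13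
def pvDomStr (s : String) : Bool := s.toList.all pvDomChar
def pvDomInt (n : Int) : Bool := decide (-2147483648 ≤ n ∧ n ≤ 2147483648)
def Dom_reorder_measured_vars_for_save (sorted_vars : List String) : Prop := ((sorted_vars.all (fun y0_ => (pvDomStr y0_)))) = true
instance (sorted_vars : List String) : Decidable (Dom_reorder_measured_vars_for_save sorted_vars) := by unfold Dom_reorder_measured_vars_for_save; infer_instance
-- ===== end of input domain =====

-- B replaces A's fixed-prefix construction by one stable sort keyed on a rank
-- dict (priority names 0..5, rest 6) after dropping repeated priority names
-- (objective: alternative algorithm).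


-- ===== PORT A =====
def reorder_measured_vars_for_save (sorted_vars : List String) : List String :=
  let prefix1 := (["d1", "d2"] : List String).foldl
    (fun acc v => if sorted_vars.contains v then acc ++ [v] else acc) []
  let prefix2 := if sorted_vars.contains "theta" then prefix1 ++ ["theta"] else prefix1
  let prefix3 := (["sinTheta", "cosTheta", "eTheta"] : List String).foldl
    (fun acc v => if sorted_vars.contains v then acc ++ [v] else acc) prefix2
  let s := PySem.Set.ofList prefix3
  prefix3 ++ sorted_vars.filter (fun v => !(PySem.Set.contains s v))

-- ===== PORT B =====
def pvRank : PySem.Dict String Int :=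
  PySem.Dict.ofList [("d1", 0), ("d2", 1), ("theta", 2), ("sinTheta", 3), ("cosTheta", 4), ("eTheta", 5)]

def reorder_measured_vars_for_save_alt (sorted_vars : List String) : List String :=
  let st := sorted_vars.foldl
    (fun (st : PySem.Set String × List String) v =>
      if PySem.Dict.contains pvRank v then
        if PySem.Set.contains st.1 v then st
        else (PySem.Set.add st.1 v, st.2 ++ [v])
      else (st.1, st.2 ++ [v]))
    (PySem.Set.empty, [])
  PySem.List.sorted st.2 (fun v => PySem.Dict.getD pvRank v 6) false

-- ===== PRECONDITION & SPEC =====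
def Spec_reorder_measured_vars_for_save (sorted_vars : List String) (out : List String) : Prop := out = reorder_measured_vars_for_save_alt sorted_vars
instance (sorted_vars : List String) (out : List String) : Decidable (Spec_reorder_measured_vars_for_save sorted_vars out) := by unfold Spec_reorder_measured_vars_for_save; infer_instance

-- ===== CLAIM (what is proved, stated in full; the proofs are below) =====
def Claim_equal_reorder_measured_vars_for_save : Prop := ∀ (sorted_vars : List String), Dom_reorder_measured_vars_for_save sorted_vars → Spec_reorder_measured_vars_for_save sorted_vars (reorder_measured_vars_for_save sorted_vars)

-- ===== LEMMAS AND PROOFS =====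

def pvPriority : List String := ["d1", "d2", "theta", "sinTheta", "cosTheta", "eTheta"]

def pvKey (v : String) : Int := PySem.Dict.getD pvRank v 6

theorem pvRank_eq : pvRank = PySem.Dict.mk [("d1", 0), ("d2", 1), ("theta", 2), ("sinTheta", 3), ("cosTheta", 4), ("eTheta", 5)] := by decide

theorem pvContains_rank (v : String) :
    PySem.Dict.contains pvRank v = true ↔ v ∈ pvPriority := by
  rw [pvRank_eq]
  simp [PySem.Dict.contains, pvPriority]
  constructor <;> rintro (rfl | rfl | rfl | rfl | rfl | rfl) <;> simp

theorem pvKey_notmem {v : String} (h : v ∉ pvPriority) : pvKey v = 6 := by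
  simp only [pvPriority, List.mem_cons, not_or, List.not_mem_nil] at h
  obtain ⟨h1, h2, h3, h4, h5, h6, -⟩ := h
  simp [pvKey, PySem.Dict.getD, pvRank_eq, PySem.Dict.get?_mk_cons, PySem.Dict.get?,
    Ne.symm h1, Ne.symm h2, Ne.symm h3, Ne.symm h4, Ne.symm h5, Ne.symm h6]

theorem pvKey_lt6_of_mem {v : String} (h : v ∈ pvPriority) : pvKey v < 6 := by
  simp only [pvPriority, List.mem_cons, List.not_mem_nil, or_false] at h
  rcases h with h | h | h | h | h | h <;> subst h <;> decide

theorem pvKey_le6 (v : String) : pvKey v ≤ 6 := by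
  by_cases h : v ∈ pvPriority
  · exact le_of_lt (pvKey_lt6_of_mem h)
  · rw [pvKey_notmem h]

theorem pvInsertBy_append_left {α : Type} (before : α → α → Bool) (x : α) (P Q : List α)
    (h : ∀ y ∈ P, before x y = false) :
    PySem.List.insertBy before x (P ++ Q) = P ++ PySem.List.insertBy before x Q := by
  induction P with
  | nil => simp
  | cons p P ih =>
    have hp : before x p = false := h p (by simp)
    simp only [List.cons_append, PySem.List.insertBy, hp, Bool.false_eq_true, if_false]
    rw [ih (fun y hy => h y (by simp [hy]))]

theorem pvInsertBy_eq_cons {α : Type} (before : α → α → Bool) (x : α) (Q : List α)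
    (h : ∀ y ∈ Q, before x y = true) :
    PySem.List.insertBy before x Q = x :: Q := by
  cases Q with
  | nil => rfl
  | cons z zs => simp [PySem.List.insertBy, h z (by simp)]

-- one insertion step for a priority name x (pvPriority = L ++ x :: H)
theorem pvStep_priority (L H : List String) (x : String) (ys : List String)
    (hsplit : pvPriority = L ++ x :: H)
    (hL : ∀ y ∈ L, pvKey y < pvKey x) (hH : ∀ y ∈ H, pvKey x < pvKey y)
    (hx : x ∉ ys) :
    PySem.List.insertBy (fun a b => decide (pvKey a < pvKey b)) x
      (pvPriority.filter (fun p => ys.contains p) ++ ys.filter (fun v => !pvPriority.contains v))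
    = pvPriority.filter (fun p => (ys ++ [x]).contains p)
        ++ (ys ++ [x]).filter (fun v => !pvPriority.contains v) := by
  have hxP : x ∈ pvPriority := by rw [hsplit]; simp
  have hxL : x ∉ L := fun hmem => lt_irrefl _ (hL x hmem)
  have hxH : x ∉ H := fun hmem => lt_irrefl _ (hH x hmem)
  have hL' : L.filter (fun p => (ys ++ [x]).contains p) = L.filter (fun p => ys.contains p) := by
    apply List.filter_congr
    intro p hp
    have hpx : p ≠ x := fun hpe => hxL (hpe ▸ hp)
    simp [hpx]
  have hH' : H.filter (fun p => (ys ++ [x]).contains p) = H.filter (fun p => ys.contains p) := by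
    apply List.filter_congr
    intro p hp
    have hpx : p ≠ x := fun hpe => hxH (hpe ▸ hp)
    simp [hpx]
  have hLf : pvPriority.filter (fun p => ys.contains p)
      = L.filter (fun p => ys.contains p) ++ H.filter (fun p => ys.contains p) := by
    rw [hsplit]
    simp [List.filter_append, List.filter_cons, hx]
  have hxm : (ys ++ [x]).contains x = true := by simp
  have hPf' : pvPriority.filter (fun p => (ys ++ [x]).contains p)
      = L.filter (fun p => ys.contains p) ++ x :: H.filter (fun p => ys.contains p) := by
    rw [hsplit, List.filter_append, List.filter_cons, if_pos hxm, hL', hH']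
  have hR' : (ys ++ [x]).filter (fun v => !pvPriority.contains v)
      = ys.filter (fun v => !pvPriority.contains v) := by
    simp [List.filter_append, List.filter_cons, hxP]
  have hkx : pvKey x < 6 := pvKey_lt6_of_mem hxP
  have hno : ∀ y ∈ L.filter (fun p => ys.contains p),
      (fun a b => decide (pvKey a < pvKey b)) x y = false := by
    intro y hy
    exact decide_eq_false (lt_asymm (hL y (List.mem_of_mem_filter hy)))
  have hyes : ∀ y ∈ H.filter (fun p => ys.contains p) ++ ys.filter (fun v => !pvPriority.contains v),
      (fun a b => decide (pvKey a < pvKey b)) x y = true := by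
    intro y hy
    rcases List.mem_append.mp hy with hy | hy
    · exact decide_eq_true (hH y (List.mem_of_mem_filter hy))
    · have hyp : y ∉ pvPriority := by
        have := List.of_mem_filter hy
        simpa using this
      exact decide_eq_true (by rw [pvKey_notmem hyp]; exact hkx)
  rw [hLf, List.append_assoc, pvInsertBy_append_left _ _ _ _ hno,
    pvInsertBy_eq_cons _ _ _ hyes, hPf', hR']
  simp

-- the stable sort by pvKey, on a list without repeated priority names,
-- is exactly "priority names present (fixed order), then the rest in order"
theorem pvSort_char (xs : List String) (h : ∀ p ∈ pvPriority, xs.count p ≤ 1) :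
    PySem.List.sorted xs pvKey false
    = pvPriority.filter (fun p => xs.contains p) ++ xs.filter (fun v => !pvPriority.contains v) := by
  rw [PySem.List.sorted_eq_foldl_insertBy]
  induction xs using List.reverseRecOn with
  | nil => simp [pvPriority]
  | append_singleton ys x ih =>
    have hys : ∀ p ∈ pvPriority, ys.count p ≤ 1 := by
      intro p hp
      have := h p hp
      rw [List.count_append] at this
      omega
    rw [List.foldl_append, List.foldl_cons, List.foldl_nil, ih hys]
    by_cases hx : x ∈ pvPriority
    · have hxys : x ∉ ys := by
        intro hmem
        have hc := h x hx
        rw [List.count_append] at hc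
        have h1 : 0 < ys.count x := List.count_pos_iff.mpr hmem
        have h2 : ([x] : List String).count x = 1 := by simp
        omega
      simp only [pvPriority, List.mem_cons, List.not_mem_nil, or_false] at hx
      rcases hx with hx | hx | hx | hx | hx | hx <;> subst hx
      · exact pvStep_priority [] ["d2", "theta", "sinTheta", "cosTheta", "eTheta"] _ ys rfl
          (by decide) (by decide) hxys
      · exact pvStep_priority ["d1"] ["theta", "sinTheta", "cosTheta", "eTheta"] _ ys rfl
          (by decide) (by decide) hxys
      · exact pvStep_priority ["d1", "d2"] ["sinTheta", "cosTheta", "eTheta"] _ ys rfl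
          (by decide) (by decide) hxys
      · exact pvStep_priority ["d1", "d2", "theta"] ["cosTheta", "eTheta"] _ ys rfl
          (by decide) (by decide) hxys
      · exact pvStep_priority ["d1", "d2", "theta", "sinTheta"] ["eTheta"] _ ys rfl
          (by decide) (by decide) hxys
      · exact pvStep_priority ["d1", "d2", "theta", "sinTheta", "cosTheta"] [] _ ys rfl
          (by decide) (by decide) hxys
    · rw [PySem.List.insertBy_of_forall_not_before _ x _ (by
        intro y hy
        exact decide_eq_false (by rw [pvKey_notmem hx]; exact not_lt.mpr (pvKey_le6 y)))]
      have hPf : pvPriority.filter (fun p => (ys ++ [x]).contains p)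
          = pvPriority.filter (fun p => ys.contains p) := by
        apply List.filter_congr
        intro p hp
        have hpx : p ≠ x := fun hpe => hx (hpe ▸ hp)
        simp [hpx]
      have hRf : (ys ++ [x]).filter (fun v => !pvPriority.contains v)
          = ys.filter (fun v => !pvPriority.contains v) ++ [x] := by
        simp [List.filter_append, List.filter_cons, hx]
      rw [hPf, hRf, List.append_assoc]

-- B's dedup pass as a standalone recursion
def pvDedup (xs : List String) (s : PySem.Set String) : List String :=
  match xs with
  | [] => []
  | v :: vs =>
    if PySem.Dict.contains pvRank v then
      if PySem.Set.contains s v then pvDedup vs s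
      else v :: pvDedup vs (PySem.Set.add s v)
    else v :: pvDedup vs s

theorem pvSet_contains_iff {s : PySem.Set String} {v : String} :
    PySem.Set.contains s v = true ↔ v ∈ s := by
  simp [PySem.Set.contains]

theorem pvDedup_cons_skip {v : String} {vs : List String} {s : PySem.Set String}
    (h1 : PySem.Dict.contains pvRank v = true) (h2 : v ∈ s) :
    pvDedup (v :: vs) s = pvDedup vs s := by
  simp [pvDedup, h1, h2]

theorem pvDedup_cons_prio {v : String} {vs : List String} {s : PySem.Set String}
    (h1 : PySem.Dict.contains pvRank v = true) (h2 : v ∉ s) :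
    pvDedup (v :: vs) s = v :: pvDedup vs (PySem.Set.add s v) := by
  simp [pvDedup, h1, h2]

theorem pvDedup_cons_rest {v : String} {vs : List String} {s : PySem.Set String}
    (h1 : ¬ PySem.Dict.contains pvRank v = true) :
    pvDedup (v :: vs) s = v :: pvDedup vs s := by
  simp [pvDedup, h1]

theorem pvFold_snd (xs : List String) (s : PySem.Set String) (d : List String) :
    (xs.foldl
      (fun (st : PySem.Set String × List String) v =>
        if PySem.Dict.contains pvRank v then
          if PySem.Set.contains st.1 v then st
          else (PySem.Set.add st.1 v, st.2 ++ [v])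
        else (st.1, st.2 ++ [v]))
      (s, d)).2 = d ++ pvDedup xs s := by
  induction xs generalizing s d with
  | nil => simp [pvDedup]
  | cons v vs ih =>
    simp only [List.foldl_cons]
    by_cases h1 : PySem.Dict.contains pvRank v = true
    · by_cases h2 : v ∈ s
      · have e1 : PySem.Set.contains s v = true := pvSet_contains_iff.mpr h2
        rw [if_pos h1, if_pos e1, pvDedup_cons_skip h1 h2]
        exact ih s d
      · have e1 : ¬ PySem.Set.contains s v = true := fun hc => h2 (pvSet_contains_iff.mp hc)
        rw [if_pos h1, if_neg e1, pvDedup_cons_prio h1 h2, ih (PySem.Set.add s v) (d ++ [v])]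
        simp
    · rw [if_neg h1, pvDedup_cons_rest h1, ih s (d ++ [v])]
      simp

theorem pvDedup_count (xs : List String) (s : PySem.Set String) (p : String)
    (hp : p ∈ pvPriority) :
    (pvDedup xs s).count p ≤ (if p ∈ s then 0 else 1) := by
  induction xs generalizing s with
  | nil =>
    simp only [pvDedup, List.count_nil]
    split <;> simp
  | cons v vs ih =>
    by_cases h1 : PySem.Dict.contains pvRank v = true
    · by_cases h2 : v ∈ s
      · rw [pvDedup_cons_skip h1 h2]
        exact ih s
      · rw [pvDedup_cons_prio h1 h2, List.count_cons]
        have ih' := ih (PySem.Set.add s v)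
        by_cases hpv : p = v
        · subst hpv
          have hmem : p ∈ PySem.Set.add s p := (PySem.Set.mem_add s p p).mpr (Or.inr rfl)
          rw [if_pos hmem] at ih'
          simp only [BEq.rfl, if_true, if_neg h2]
          omega
        · have hmem : (p ∈ PySem.Set.add s v) ↔ p ∈ s := by
            rw [PySem.Set.mem_add]; simp [hpv]
          simp only [hmem] at ih'
          have hb : (v == p) = false := beq_eq_false_iff_ne.mpr (Ne.symm hpv)
          simp only [hb, Bool.false_eq_true, if_false, add_zero]
          exact ih'
    · have hvp : v ∉ pvPriority := fun hm => h1 ((pvContains_rank v).mpr hm)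
      have hpv : p ≠ v := fun hpe => hvp (hpe ▸ hp)
      rw [pvDedup_cons_rest h1, List.count_cons]
      have hb : (v == p) = false := beq_eq_false_iff_ne.mpr (Ne.symm hpv)
      simp only [hb, Bool.false_eq_true, if_false, add_zero]
      exact ih s

theorem pvDedup_mem (xs : List String) (s : PySem.Set String) (p : String)
    (hp : p ∈ pvPriority) :
    p ∈ pvDedup xs s ↔ p ∈ xs ∧ p ∉ s := by
  induction xs generalizing s with
  | nil => simp [pvDedup]
  | cons v vs ih =>
    by_cases h1 : PySem.Dict.contains pvRank v = true
    · by_cases h2 : v ∈ s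
      · rw [pvDedup_cons_skip h1 h2, ih s]
        constructor
        · rintro ⟨hm, hns⟩; exact ⟨by simp [hm], hns⟩
        · rintro ⟨hm, hns⟩
          rcases List.mem_cons.mp hm with hpe | hm
          · exact absurd (hpe ▸ h2) hns
          · exact ⟨hm, hns⟩
      · rw [pvDedup_cons_prio h1 h2, List.mem_cons, ih (PySem.Set.add s v), PySem.Set.mem_add]
        by_cases hpv : p = v
        · subst hpv
          simp [h2]
        · simp [hpv]
    · have hvp : v ∉ pvPriority := fun hm => h1 ((pvContains_rank v).mpr hm)
      have hpv : p ≠ v := fun hpe => hvp (hpe ▸ hp)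
      rw [pvDedup_cons_rest h1, List.mem_cons, ih s]
      simp [hpv]

theorem pvDedup_filter (xs : List String) (s : PySem.Set String) :
    (pvDedup xs s).filter (fun v => !pvPriority.contains v)
      = xs.filter (fun v => !pvPriority.contains v) := by
  induction xs generalizing s with
  | nil => simp [pvDedup]
  | cons v vs ih =>
    by_cases h1 : PySem.Dict.contains pvRank v = true
    · have hvp : v ∈ pvPriority := (pvContains_rank v).mp h1
      by_cases h2 : v ∈ s
      · rw [pvDedup_cons_skip h1 h2, ih s, List.filter_cons]
        simp [hvp]
      · rw [pvDedup_cons_prio h1 h2, List.filter_cons, List.filter_cons, ih (PySem.Set.add s v)]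
    · have hvp : v ∉ pvPriority := fun hm => h1 ((pvContains_rank v).mpr hm)
      rw [pvDedup_cons_rest h1, List.filter_cons, List.filter_cons, ih s]

-- A's prefix is the priority names present, in the fixed order
theorem pvA_prefix (sorted_vars : List String) :
    ((["sinTheta", "cosTheta", "eTheta"] : List String).foldl
      (fun acc v => if sorted_vars.contains v then acc ++ [v] else acc)
      (if sorted_vars.contains "theta" then
        ((["d1", "d2"] : List String).foldl
          (fun acc v => if sorted_vars.contains v then acc ++ [v] else acc) []) ++ ["theta"]
       else
        ((["d1", "d2"] : List String).foldl
          (fun acc v => if sorted_vars.contains v then acc ++ [v] else acc) [])))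
    = pvPriority.filter (fun p => sorted_vars.contains p) := by
  simp only [pvPriority, List.foldl, List.filter]
  split_ifs <;> simp_all

theorem pvReorder_eq (sorted_vars : List String) :
    reorder_measured_vars_for_save sorted_vars = reorder_measured_vars_for_save_alt sorted_vars := by
  unfold reorder_measured_vars_for_save reorder_measured_vars_for_save_alt
  dsimp only
  rw [pvA_prefix, pvFold_snd]
  simp only [List.nil_append]
  have hkey : (fun v => PySem.Dict.getD pvRank v 6) = pvKey := rfl
  rw [hkey, pvSort_char (pvDedup sorted_vars PySem.Set.empty) (by
    intro p hp
    have := pvDedup_count sorted_vars PySem.Set.empty p hp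
    simpa [PySem.Set.empty] using this)]
  congr 1
  · -- prefixes agree
    apply List.filter_congr
    intro p hp
    have hmem := pvDedup_mem sorted_vars PySem.Set.empty p hp
    simp only [PySem.Set.empty, List.not_mem_nil, not_false_iff, and_true] at hmem
    by_cases hs : p ∈ sorted_vars <;> simp [hmem, hs]
  · -- rests agree
    rw [pvDedup_filter]
    apply List.filter_congr
    intro v hv
    by_cases h : v ∈ pvPriority <;>
      simp_all [PySem.Set.contains, PySem.Set.mem_ofList, List.mem_filter]


-- ===== VERDICT (by name: the statement is the Claim_ definition above) =====
theorem reorder_measured_vars_for_save_spec : Claim_equal_reorder_measured_vars_for_save := by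
  intro sorted_vars _
  unfold Spec_reorder_measured_vars_for_save
  exact pvReorder_eq sorted_vars
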